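-- pv_equiv track=rewrite | github.com/v-t-9/PythonPuzzles | ex79.py | largest_negative_smallest_positive
-- ===== SOURCE A (Python) =====
-- def largest_negative_smallest_positive(l):
--     n = [i for i in l if i <0]
--     p = [i for i in l if i>0]
--
--     if n == [] and p == []:
--         return [0, 0]
--     if n == []:
--         return [0 , min(p)]
--     if p == []:
--         return [max(n), 0]
--     else:
--         return [max(n), min(p)]
-- ===== SOURCE B (Python) =====
-- def largest_negative_smallest_positive(l):
--     best_neg = None
--     best_pos = None
--     for i in l:
--         if i < 0 and (best_neg is None or i > best_neg):
--             best_neg = i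
--         if i > 0 and (best_pos is None or i < best_pos):
--             best_pos = i
--     return [0 if best_neg is None else best_neg,
--             0 if best_pos is None else best_pos]
-- ===== Notes on version B (the rewrite author's own statement) =====
-- stated objective: alternative
-- what changed: Replaces the two filtered intermediate lists plus max()/min() reductions and the four-way empty-case branch by one pass over l maintaining two optional running extrema with a default of 0 at the end.
import Mathlib
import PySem

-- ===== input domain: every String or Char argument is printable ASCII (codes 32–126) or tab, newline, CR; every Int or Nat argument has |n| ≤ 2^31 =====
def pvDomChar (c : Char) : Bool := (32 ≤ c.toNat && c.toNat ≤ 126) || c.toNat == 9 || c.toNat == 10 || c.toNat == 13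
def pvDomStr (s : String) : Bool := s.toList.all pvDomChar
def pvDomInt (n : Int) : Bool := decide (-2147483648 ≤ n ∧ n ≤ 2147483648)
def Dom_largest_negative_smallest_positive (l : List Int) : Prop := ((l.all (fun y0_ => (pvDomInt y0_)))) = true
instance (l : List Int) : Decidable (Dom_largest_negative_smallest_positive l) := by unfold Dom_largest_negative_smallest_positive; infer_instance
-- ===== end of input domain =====

-- B replaces A's two filtered lists with max()/min() reductions by one pass keeping two optional running extrema (alternative decomposition, same cost).

-- ===== PORT A =====
def largest_negative_smallest_positive (l : List Int) : List Int :=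
  let n := l.filter (fun i => decide (i < 0))
  let p := l.filter (fun i => decide (0 < i))
  if n = [] ∧ p = [] then [0, 0]
  else if n = [] then [0, (PySem.List.min? p (fun x => x)).getD 0]
  else if p = [] then [(PySem.List.max? n (fun x => x)).getD 0, 0]
  else [(PySem.List.max? n (fun x => x)).getD 0, (PySem.List.min? p (fun x => x)).getD 0]

-- ===== PORT B =====
def lnspStep (st : Option Int × Option Int) (i : Int) : Option Int × Option Int :=
  let bn := if decide (i < 0) && (match st.1 with | none => true | some b => decide (b < i)) then some i else st.1
  let bp := if decide (0 < i) && (match st.2 with | none => true | some b => decide (i < b)) then some i else st.2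
  (bn, bp)

def largest_negative_smallest_positive_alt (l : List Int) : List Int :=
  let st := l.foldl lnspStep (none, none)
  [st.1.getD 0, st.2.getD 0]

-- ===== PRECONDITION & SPEC =====
def Spec_largest_negative_smallest_positive (l : List Int) (out : List Int) : Prop := out = largest_negative_smallest_positive_alt l
instance (l : List Int) (out : List Int) : Decidable (Spec_largest_negative_smallest_positive l out) := by unfold Spec_largest_negative_smallest_positive; infer_instance

-- ===== CLAIM (what is proved, stated in full; the proofs are below) =====
def Claim_equal_largest_negative_smallest_positive : Prop := ∀ (l : List Int), Dom_largest_negative_smallest_positive l → Spec_largest_negative_smallest_positive l (largest_negative_smallest_positive l)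

-- ===== LEMMAS AND PROOFS =====

def lnspMax (o : Option Int) (i : Int) : Option Int :=
  some (match o with | none => i | some b => max b i)

def lnspMin (o : Option Int) (i : Int) : Option Int :=
  some (match o with | none => i | some b => min b i)

-- the combined one-pass fold decomposes into the two filtered folds
lemma lnspStep_fst_neg (bn bp : Option Int) (i : Int) (h : i < 0) :
    (lnspStep (bn, bp) i).1 = lnspMax bn i := by
  cases bn with
  | none => simp [lnspStep, lnspMax, h]
  | some b =>
    by_cases hb : b < i
    · simp [lnspStep, lnspMax, h, hb, max_eq_right (le_of_lt hb)]
    · simp [lnspStep, lnspMax, h, hb, max_eq_left (by omega : i ≤ b)]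

lemma lnspStep_fst_nonneg (bn bp : Option Int) (i : Int) (h : ¬ i < 0) :
    (lnspStep (bn, bp) i).1 = bn := by
  simp [lnspStep, h]

lemma lnspStep_snd_pos (bn bp : Option Int) (i : Int) (h : 0 < i) :
    (lnspStep (bn, bp) i).2 = lnspMin bp i := by
  cases bp with
  | none => simp [lnspStep, lnspMin, h]
  | some b =>
    by_cases hb : i < b
    · simp [lnspStep, lnspMin, h, hb, min_eq_right (le_of_lt hb)]
    · simp [lnspStep, lnspMin, h, hb, min_eq_left (by omega : b ≤ i)]

lemma lnspStep_snd_nonpos (bn bp : Option Int) (i : Int) (h : ¬ 0 < i) :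
    (lnspStep (bn, bp) i).2 = bp := by
  simp [lnspStep, h]

lemma lnsp_loop_eq (l : List Int) (bn bp : Option Int) :
    l.foldl lnspStep (bn, bp) =
      ((l.filter (fun i => decide (i < 0))).foldl lnspMax bn,
       (l.filter (fun i => decide (0 < i))).foldl lnspMin bp) := by
  induction l generalizing bn bp with
  | nil => rfl
  | cons i t ih =>
    simp only [List.foldl_cons, List.filter_cons]
    have hsplit : lnspStep (bn, bp) i = ((lnspStep (bn, bp) i).1, (lnspStep (bn, bp) i).2) := rfl
    rw [hsplit, ih]
    by_cases h : i < 0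
    · have h2 : ¬ 0 < i := by omega
      rw [lnspStep_fst_neg bn bp i h, lnspStep_snd_nonpos bn bp i h2]
      simp [h, h2]
    · by_cases h2 : 0 < i
      · rw [lnspStep_fst_nonneg bn bp i h, lnspStep_snd_pos bn bp i h2]
        simp [h, h2]
      · rw [lnspStep_fst_nonneg bn bp i h, lnspStep_snd_nonpos bn bp i h2]
        simp [h, h2]

lemma lnspMax_foldl_some (t : List Int) (x : Int) :
    t.foldl lnspMax (some x) = some (t.foldl max x) := by
  induction t generalizing x with
  | nil => rfl
  | cons a t ih => simp [List.foldl_cons, lnspMax, ih]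

lemma lnspMin_foldl_some (t : List Int) (x : Int) :
    t.foldl lnspMin (some x) = some (t.foldl min x) := by
  induction t generalizing x with
  | nil => rfl
  | cons a t ih => simp [List.foldl_cons, lnspMin, ih]

lemma lnspMax_eq_max? (xs : List Int) :
    xs.foldl lnspMax none = PySem.List.max? xs (fun x => x) := by
  cases xs with
  | nil => rfl
  | cons x t =>
    rw [PySem.List.max?_id_cons]
    simp [List.foldl_cons, lnspMax, lnspMax_foldl_some]

lemma lnspMin_eq_min? (xs : List Int) :
    xs.foldl lnspMin none = PySem.List.min? xs (fun x => x) := by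
  cases xs with
  | nil => rfl
  | cons x t =>
    rw [PySem.List.min?_id_cons]
    simp [List.foldl_cons, lnspMin, lnspMin_foldl_some]

-- ===== VERDICT (by name: the statement is the Claim_ definition above) =====
theorem largest_negative_smallest_positive_spec : Claim_equal_largest_negative_smallest_positive := by
  intro l _
  unfold Spec_largest_negative_smallest_positive
  unfold largest_negative_smallest_positive largest_negative_smallest_positive_alt
  rw [lnsp_loop_eq, lnspMax_eq_max?, lnspMin_eq_min?]
  set n := l.filter (fun i => decide (i < 0)) with hn
  set p := l.filter (fun i => decide (0 < i)) with hp
  by_cases hne : n = [] <;> by_cases hpe : p = [] <;>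
    simp [hne, hpe, PySem.List.max?, PySem.List.min?]
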